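-- pv_equiv track=rewrite | github.com/Avbreht/vaje_rac1 | vaje_11/kovanci_vrsta.py | rek_kov_max
-- ===== SOURCE A (Python) =====
-- def rek_kov_max(i,vrednosti, k):
--     if k == 0:
--         return 0
--     if i == 1:
--         return vrednosti[0]
--     if i == 2:
--         return max(vrednosti[0], vrednosti[1])
--     brez = rek_kov_max(i - 1, vrednosti, k)
--     z = rek_kov_max(i - 2, vrednosti, k-1) + vrednosti[i - 1]
--     return max(brez, z)
-- ===== SOURCE B (Python) =====
-- def rek_kov_max(i, vrednosti, k):
--     if k == 0:
--         return 0
--     cap = max((i + 1) // 2, 1)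
--     kk = k if 0 < k <= cap else cap
--     prev = [0] + [vrednosti[0]] * kk            # row j = 1: best using <= m coins among first 1
--     if i == 1:
--         return prev[kk]
--     cur = [0] + [max(vrednosti[0], vrednosti[1])] * kk   # row j = 2
--     for j in range(3, i + 1):
--         prev, cur = cur, [0] + [max(cur[m], prev[m - 1] + vrednosti[j - 1])
--                                 for m in range(1, kk + 1)]
--     return cur[kk]
-- ===== Notes on version B (the rewrite author's own statement) =====
-- stated objective: alternative
-- what changed: Replaced A's branching recursion by a bottom-up dynamic program over rows indexed by the coin budget (clamped to ceil(i/2), beyond which it is never binding), keeping only the last two rows.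
import Mathlib
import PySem

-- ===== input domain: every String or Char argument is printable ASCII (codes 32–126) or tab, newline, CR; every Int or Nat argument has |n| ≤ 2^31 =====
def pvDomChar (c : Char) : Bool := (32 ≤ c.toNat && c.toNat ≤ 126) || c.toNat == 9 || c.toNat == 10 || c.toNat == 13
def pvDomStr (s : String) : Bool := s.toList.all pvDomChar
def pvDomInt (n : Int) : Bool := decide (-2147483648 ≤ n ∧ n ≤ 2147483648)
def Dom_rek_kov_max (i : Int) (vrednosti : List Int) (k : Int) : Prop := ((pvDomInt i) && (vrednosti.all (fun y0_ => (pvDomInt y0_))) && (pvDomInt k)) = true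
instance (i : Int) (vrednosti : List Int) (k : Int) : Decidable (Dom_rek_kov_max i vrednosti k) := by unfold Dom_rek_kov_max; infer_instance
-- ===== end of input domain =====

-- B replaces A's branching recursion by a bottom-up DP over rows indexed by the
-- coin budget (clamped to ceil(i/2), past which it is never binding).

-- ===== PORT A =====
-- literal transliteration; the dite guard only makes the recursion total: Python diverges
-- for i ≤ 0 with k ≠ 0 (outside Pre_), the `else 0` branch is never reached inside Pre_.
def rek_kov_max (i : Int) (vrednosti : List Int) (k : Int) : Int :=
  if k = 0 then 0
  else if i = 1 then PySem.List.pyGetD vrednosti 0 0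
  else if i = 2 then max (PySem.List.pyGetD vrednosti 0 0) (PySem.List.pyGetD vrednosti 1 0)
  else if _h : 3 ≤ i then
    max (rek_kov_max (i - 1) vrednosti k)
        (rek_kov_max (i - 2) vrednosti (k - 1) + PySem.List.pyGetD vrednosti (i - 1) 0)
  else 0
termination_by i.toNat
decreasing_by all_goals omega

-- ===== PORT B =====
-- the body of B's `for j in range(3, i+1)` loop
def pvStep (vrednosti : List Int) (kk : Int) (pc : List Int × List Int) (j : Int) :
    List Int × List Int :=
  (pc.2, 0 :: (PySem.List.pyRange 1 (kk + 1) 1).map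
      (fun m => max (PySem.List.pyGetD pc.2 m 0)
                    (PySem.List.pyGetD pc.1 (m - 1) 0 + PySem.List.pyGetD vrednosti (j - 1) 0)))

def rek_kov_max_alt (i : Int) (vrednosti : List Int) (k : Int) : Int :=
  if k = 0 then 0
  else
    let cap : Int := max (PySem.Int.floordiv (i + 1) 2) 1
    let kk : Int := if 0 < k ∧ k ≤ cap then k else cap
    let prev : List Int := 0 :: List.replicate kk.toNat (PySem.List.pyGetD vrednosti 0 0)
    if i = 1 then PySem.List.pyGetD prev kk 0
    else
      let cur : List Int := 0 :: List.replicate kk.toNat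
          (max (PySem.List.pyGetD vrednosti 0 0) (PySem.List.pyGetD vrednosti 1 0))
      let res := (PySem.List.pyRange 3 (i + 1) 1).foldl (pvStep vrednosti kk) (prev, cur)
      PySem.List.pyGetD res.2 kk 0

-- ===== PRECONDITION & SPEC =====
-- Pre_ excludes exactly the inputs on which A raises: with k ≠ 0, A recurses below i = 1
-- forever (RecursionError) when i < 1, and hits an out-of-range vrednosti[...] when i > len.
def Pre_rek_kov_max (i : Int) (vrednosti : List Int) (k : Int) : Prop :=
  k = 0 ∨ (1 ≤ i ∧ i ≤ (vrednosti.length : Int))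
instance (i : Int) (vrednosti : List Int) (k : Int) : Decidable (Pre_rek_kov_max i vrednosti k) := by
  unfold Pre_rek_kov_max; infer_instance
def pvWitness_rek_kov_max : Int × List Int × Int := (3, [1, 5, 2], 2)

def Spec_rek_kov_max (i : Int) (vrednosti : List Int) (k : Int) (out : Int) : Prop := out = rek_kov_max_alt i vrednosti k
instance (i : Int) (vrednosti : List Int) (k : Int) (out : Int) : Decidable (Spec_rek_kov_max i vrednosti k out) := by unfold Spec_rek_kov_max; infer_instance

-- ===== CLAIM (what is proved, stated in full; the proofs are below) =====
def Claim_equal_rek_kov_max : Prop := ∀ (i : Int) (vrednosti : List Int) (k : Int), Dom_rek_kov_max i vrednosti k → Pre_rek_kov_max i vrednosti k → Spec_rek_kov_max i vrednosti k (rek_kov_max i vrednosti k)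

-- ===== LEMMAS AND PROOFS =====

-- unfolding equations for A's port
theorem f_k0 (i : Int) (v : List Int) : rek_kov_max i v 0 = 0 := by
  rw [rek_kov_max]; simp

theorem f_one {k : Int} (v : List Int) (hk : k ≠ 0) :
    rek_kov_max 1 v k = PySem.List.pyGetD v 0 0 := by
  rw [rek_kov_max]; simp [hk]

theorem f_two {k : Int} (v : List Int) (hk : k ≠ 0) :
    rek_kov_max 2 v k = max (PySem.List.pyGetD v 0 0) (PySem.List.pyGetD v 1 0) := by
  rw [rek_kov_max]; simp [hk]

theorem f_step {i k : Int} (v : List Int) (hk : k ≠ 0) (h3 : 3 ≤ i) :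
    rek_kov_max i v k =
      max (rek_kov_max (i - 1) v k)
          (rek_kov_max (i - 2) v (k - 1) + PySem.List.pyGetD v (i - 1) 0) := by
  rw [rek_kov_max]
  rw [if_neg hk, if_neg (by omega : ¬ i = 1), if_neg (by omega : ¬ i = 2), dif_pos h3]

-- "the budget k is not binding": k negative (never exhausted) or at least ceil(i/2)
def Big (i k : Int) : Prop := k ≤ -1 ∨ (i + 1) / 2 ≤ k

theorem big_ne {i k : Int} (h1 : 1 ≤ i) (hb : Big i k) : k ≠ 0 := by
  unfold Big at hb; omega

-- A's value does not depend on the budget once it is not binding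
theorem clamp (v : List Int) : ∀ n : Nat, ∀ i k k' : Int, i.toNat = n → 1 ≤ i →
    Big i k → Big i k' → rek_kov_max i v k = rek_kov_max i v k' := by
  intro n
  induction n using Nat.strong_induction_on with
  | _ n ih =>
    intro i k k' hn h1 hb hb'
    have hk := big_ne h1 hb
    have hk' := big_ne h1 hb'
    by_cases hi1 : i = 1
    · subst hi1; rw [f_one v hk, f_one v hk']
    · by_cases hi2 : i = 2
      · subst hi2; rw [f_two v hk, f_two v hk']
      · have h3 : 3 ≤ i := by omega
        rw [f_step v hk h3, f_step v hk' h3]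
        have e1 : rek_kov_max (i - 1) v k = rek_kov_max (i - 1) v k' := by
          refine ih (i - 1).toNat (by omega) _ _ _ rfl (by omega) ?_ ?_ <;>
            (unfold Big at *; omega)
        have e2 : rek_kov_max (i - 2) v (k - 1) = rek_kov_max (i - 2) v (k' - 1) := by
          refine ih (i - 2).toNat (by omega) _ _ _ rfl (by omega) ?_ ?_ <;>
            (unfold Big at *; omega)
        rw [e1, e2]

-- the row of DP values with budget 0..kk for a fixed prefix length j
def RowR (v : List Int) (kk j : Int) : List Int :=
  (PySem.List.pyRange 0 (kk + 1) 1).map (fun m => rek_kov_max j v m)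

theorem rowR_get (v : List Int) (kk j m : Int) (hm0 : 0 ≤ m) (hm : m ≤ kk) :
    PySem.List.pyGetD (RowR v kk j) m 0 = rek_kov_max j v m :=
  PySem.List.pyGetD_map_pyRange_of_nonneg _ _ _ _ hm0 (by omega)

theorem rowR_cons (v : List Int) (kk j : Int) (hkk : 1 ≤ kk) :
    RowR v kk j = rek_kov_max j v 0 :: (PySem.List.pyRange 1 (kk + 1) 1).map (fun m => rek_kov_max j v m) := by
  rw [RowR, PySem.List.pyRange_one_cons (by omega), List.map_cons]
  norm_num

theorem row1 (v : List Int) (kk : Int) (hkk : 1 ≤ kk) :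
    (0 : Int) :: List.replicate kk.toNat (PySem.List.pyGetD v 0 0) = RowR v kk 1 := by
  rw [rowR_cons v kk 1 hkk, f_k0]
  congr 1
  have : ∀ m ∈ PySem.List.pyRange 1 (kk + 1) 1, rek_kov_max 1 v m = PySem.List.pyGetD v 0 0 := by
    intro m hm
    rw [PySem.List.mem_pyRange_one] at hm
    exact f_one v (by omega)
  rw [List.map_congr_left this, List.map_const', PySem.List.length_pyRange_one]
  congr 1
  omega

theorem row2 (v : List Int) (kk : Int) (hkk : 1 ≤ kk) :
    (0 : Int) :: List.replicate kk.toNat (max (PySem.List.pyGetD v 0 0) (PySem.List.pyGetD v 1 0)) = RowR v kk 2 := by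
  rw [rowR_cons v kk 2 hkk, f_k0]
  congr 1
  have : ∀ m ∈ PySem.List.pyRange 1 (kk + 1) 1, rek_kov_max 2 v m
      = max (PySem.List.pyGetD v 0 0) (PySem.List.pyGetD v 1 0) := by
    intro m hm
    rw [PySem.List.mem_pyRange_one] at hm
    exact f_two v (by omega)
  rw [List.map_congr_left this, List.map_const', PySem.List.length_pyRange_one]
  congr 1
  omega

theorem row_step (v : List Int) (kk j : Int) (hkk : 1 ≤ kk) (h3 : 3 ≤ j) :
    pvStep v kk (RowR v kk (j - 2), RowR v kk (j - 1)) j = (RowR v kk (j - 1), RowR v kk j) := by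
  unfold pvStep
  refine Prod.ext rfl ?_
  rw [rowR_cons v kk j hkk, f_k0]
  simp only
  congr 1
  refine List.map_congr_left ?_
  intro m hm
  rw [PySem.List.mem_pyRange_one] at hm
  rw [rowR_get v kk (j - 1) m (by omega) (by omega),
      rowR_get v kk (j - 2) (m - 1) (by omega) (by omega),
      f_step v (by omega) h3]

theorem fold_rows (v : List Int) (kk : Int) (hkk : 1 ≤ kk) :
    ∀ n : Nat, ∀ i : Int, i = 2 + (n : Int) →
      (PySem.List.pyRange 3 (i + 1) 1).foldl (pvStep v kk) (RowR v kk 1, RowR v kk 2)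
        = (RowR v kk (i - 1), RowR v kk i) := by
  intro n
  induction n with
  | zero =>
    intro i hi
    rw [hi, PySem.List.pyRange_one_eq_nil (by norm_num)]
    norm_num
  | succ n ihn =>
    intro i hi
    have h3 : 3 ≤ i := by omega
    rw [PySem.List.pyRange_one_append 3 i (i + 1) (by omega) (by omega),
        PySem.List.pyRange_one_singleton, List.foldl_append]
    have hpre := ihn (i - 1) (by omega)
    rw [show i - 1 + 1 = i by omega] at hpre
    rw [hpre, List.foldl_cons, List.foldl_nil,
        show i - 1 - 1 = i - 2 by omega, row_step v kk i hkk h3]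

theorem rek_kov_max_spec' (i : Int) (v : List Int) (k : Int)
    (hpre : Pre_rek_kov_max i v k) : rek_kov_max i v k = rek_kov_max_alt i v k := by
  by_cases hk : k = 0
  · subst hk
    rw [f_k0, rek_kov_max_alt]
    simp
  · have h1 : 1 ≤ i := by
      rcases hpre with h | h
      · exact absurd h hk
      · exact h.1
    have hc1 : (1 : Int) ≤ (i + 1) / 2 := by omega
    have hcap : max (PySem.Int.floordiv (i + 1) 2) 1 = (i + 1) / 2 := by
      rw [PySem.Int.floordiv_eq_ediv_of_pos (by omega)]
      omega
    rw [rek_kov_max_alt]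
    simp only [if_neg hk, hcap]
    set kk : Int := if 0 < k ∧ k ≤ (i + 1) / 2 then k else (i + 1) / 2 with hkkdef
    have hkk1 : 1 ≤ kk := by rw [hkkdef]; split <;> omega
    have hfk : rek_kov_max i v k = rek_kov_max i v kk := by
      rw [hkkdef]
      split
      · rfl
      · exact clamp v i.toNat i k ((i + 1) / 2) rfl h1 (by unfold Big; omega) (by unfold Big; omega)
    by_cases hi1 : i = 1
    · rw [if_pos hi1, row1 v kk hkk1, rowR_get v kk 1 kk (by omega) le_rfl, hfk, hi1]
    · rw [if_neg hi1]
      rw [row1 v kk hkk1, row2 v kk hkk1,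
          fold_rows v kk hkk1 (i - 2).toNat i (by omega)]
      simp only
      rw [rowR_get v kk i kk (by omega) le_rfl, hfk]

-- ===== VERDICT (by name: the statement is the Claim_ definition above) =====
theorem rek_kov_max_spec : Claim_equal_rek_kov_max := by
  intro i v k _ hpre
  exact rek_kov_max_spec' i v k hpre
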